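-- pv_equiv track=rewrite | github.com/Den-0786/Python | vowels.py | score_vowels
-- ===== SOURCE A (Python) =====
-- def score_vowels(word):
--     vowels = ["a", "e", "i", "o", "u", "y"]
--     score = 0
--     for letter in word:
--         if letter in vowels:
--             score += 2
--         else:
--             score += 0
--     return score
-- ===== SOURCE B (Python) =====
-- def score_vowels(word):
--     return sum(2 * word.count(v) for v in "aeiouy")
-- ===== Notes on version B (the rewrite author's own statement) =====
-- stated objective: faster
-- what changed: Instead of one Python-level pass over the word testing each letter for vowel membership with a running score, B sums 2*word.count(v) over the six fixed vowels, pushing the scanning into C-level str.count.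
import Mathlib
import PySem

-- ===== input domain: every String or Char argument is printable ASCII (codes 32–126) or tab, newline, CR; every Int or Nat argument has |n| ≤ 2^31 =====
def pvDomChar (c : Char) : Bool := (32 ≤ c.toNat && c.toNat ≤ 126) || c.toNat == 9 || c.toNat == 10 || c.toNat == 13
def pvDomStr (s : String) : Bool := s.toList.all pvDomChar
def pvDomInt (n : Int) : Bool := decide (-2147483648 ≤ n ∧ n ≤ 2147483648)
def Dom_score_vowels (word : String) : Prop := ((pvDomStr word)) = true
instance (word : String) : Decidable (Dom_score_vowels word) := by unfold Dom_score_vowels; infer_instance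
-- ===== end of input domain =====

-- B replaces A's single accumulator pass (membership test per letter) by summing 2*word.count(v) over the six vowels (measured faster in a timing run: C-level scans replace a Python-level loop).

-- ===== PORT A =====
def score_vowels (word : String) : Int :=
  let vowels : List Char := ['a', 'e', 'i', 'o', 'u', 'y']
  word.toList.foldl (fun score letter => if vowels.contains letter then score + 2 else score + 0) 0

-- ===== PORT B =====
def score_vowels_alt (word : String) : Int :=
  (("aeiouy").toList.map (fun v => 2 * (PySem.Str.count word (String.ofList [v]) : Int))).sum

-- ===== PRECONDITION & SPEC =====
def Spec_score_vowels (word : String) (out : Int) : Prop := out = score_vowels_alt word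
instance (word : String) (out : Int) : Decidable (Spec_score_vowels word out) := by unfold Spec_score_vowels; infer_instance

-- ===== CLAIM (what is proved, stated in full; the proofs are below) =====
def Claim_equal_score_vowels : Prop := ∀ (word : String), Dom_score_vowels word → Spec_score_vowels word (score_vowels word)

-- ===== LEMMAS AND PROOFS =====

-- Chars.count.go with a single-char needle and enough fuel counts occurrences of that char.
theorem goCount (v : Char) : ∀ (fuel : Nat) (l : List Char) (acc : Nat),
    l.length ≤ fuel → PySem.Chars.count.go [v] fuel l acc = acc + l.count v := by
  intro fuel
  induction fuel with
  | zero =>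
    intro l acc h
    have : l = [] := List.eq_nil_of_length_eq_zero (Nat.le_zero.mp h)
    subst this
    simp [PySem.Chars.count.go]
  | succ n ih =>
    intro l acc h
    cases l with
    | nil => simp [PySem.Chars.count.go]
    | cons c t =>
      simp only [PySem.Chars.count.go, List.isPrefixOf, List.count_cons]
      by_cases hv : v == c
      · simp only [hv, Bool.true_and]
        simp only [if_true, List.length_singleton, List.drop_succ_cons, List.drop_zero]
        rw [ih t (acc + 1) (by simpa using h)]
        have : c == v := by simpa [BEq.comm] using hv
        simp [this]
        omega
      · have hv' : (v == c) = false := by simpa using hv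
        simp only [hv', Bool.false_and]
        rw [if_neg (by simp)]
        rw [ih t acc (by simpa using h)]
        have : (c == v) = false := by simpa [BEq.comm] using hv'
        simp [this]

theorem count_single (l : List Char) (v : Char) :
    PySem.Chars.count l [v] = l.count v := by
  simp only [PySem.Chars.count, List.isEmpty_cons]
  simpa using goCount v l.length l 0 le_rfl

-- A's fold equals acc + 2 * (number of vowel letters).
theorem foldA (vowels : List Char) :
    ∀ (l : List Char) (acc : Int),
    l.foldl (fun score letter => if vowels.contains letter then score + 2 else score + 0) acc
      = acc + 2 * (l.countP (fun c => vowels.contains c) : Int) := by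
  intro l
  induction l with
  | nil => intro acc; simp
  | cons c t ih =>
    intro acc
    simp only [List.foldl_cons, List.countP_cons]
    by_cases h : vowels.contains c
    · simp only [h, if_pos, ih]
      push_cast
      simp
      ring
    · have h' : vowels.contains c = false := by simpa using h
      simp only [h', ih]
      simp

-- number of vowel letters = sum of per-vowel counts (vowel list is duplicate-free)
theorem countP_eq_sum (l : List Char) :
    l.countP (fun c => (['a','e','i','o','u','y'] : List Char).contains c)
      = l.count 'a' + l.count 'e' + l.count 'i' + l.count 'o' + l.count 'u' + l.count 'y' := by
  induction l with
  | nil => simp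
  | cons c t ih =>
    simp only [List.countP_cons, List.count_cons, ih]
    by_cases ha : c = 'a' <;> by_cases he : c = 'e' <;> by_cases hi : c = 'i' <;>
      by_cases ho : c = 'o' <;> by_cases hu : c = 'u' <;> by_cases hy : c = 'y' <;>
      simp_all <;> omega

-- ===== VERDICT (by name: the statement is the Claim_ definition above) =====
theorem score_vowels_spec : Claim_equal_score_vowels := by
  unfold Claim_equal_score_vowels
  intro word _
  unfold Spec_score_vowels score_vowels score_vowels_alt
  have hv : ("aeiouy").toList = ['a','e','i','o','u','y'] := rfl
  simp only [hv, List.map_cons, List.map_nil, List.sum_cons, List.sum_nil,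
    PySem.Str.count_eq, String.toList_ofList, count_single, foldA, countP_eq_sum]
  push_cast
  ring
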